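-- pv_equiv track=rewrite | github.com/richard-blazek/ImageSort | strnum.py | convert
-- ===== SOURCE A (Python) =====
-- alphabet = '0123456789ABCDEFGHIJKLMNOPQRSTUVWXYZ'
--
-- def convert(num, min_length = 1):
-- 	result = ''
-- 	while num > 0:
-- 		result = alphabet[num % 36] + result
-- 		num = num // 36
-- 	if len(result) < min_length:
-- 		return '0' * (min_length - len(result)) + result
-- 	return result
-- ===== SOURCE B (Python) =====
-- alphabet = '0123456789ABCDEFGHIJKLMNOPQRSTUVWXYZ'
--
-- def convert(num, min_length = 1):
-- 	# MSB-first positional extraction: count the base-36 digits, then read each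
-- 	# digit directly as (num // 36**p) % 36 from the top position down; the
-- 	# padding is the all-zero prefix up to max(digits, min_length).
-- 	m = max(num, 0)
-- 	digits = 0
-- 	n = m
-- 	while n > 0:
-- 		n //= 36
-- 		digits += 1
-- 	length = max(digits, min_length)
-- 	return '0' * (length - digits) + ''.join(
-- 		alphabet[(m // 36 ** p) % 36] for p in range(digits - 1, -1, -1))
-- ===== Notes on version B (the rewrite author's own statement) =====
-- stated objective: alternative
-- what changed: A builds the string LSB-first by repeated prepend and pads afterwards; B first counts the base-36 digits, prepends the all-zero padding up to max(digits, min_length), and emits each digit MSB-first by positional extraction (num // 36**p) % 36.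
import Mathlib
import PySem

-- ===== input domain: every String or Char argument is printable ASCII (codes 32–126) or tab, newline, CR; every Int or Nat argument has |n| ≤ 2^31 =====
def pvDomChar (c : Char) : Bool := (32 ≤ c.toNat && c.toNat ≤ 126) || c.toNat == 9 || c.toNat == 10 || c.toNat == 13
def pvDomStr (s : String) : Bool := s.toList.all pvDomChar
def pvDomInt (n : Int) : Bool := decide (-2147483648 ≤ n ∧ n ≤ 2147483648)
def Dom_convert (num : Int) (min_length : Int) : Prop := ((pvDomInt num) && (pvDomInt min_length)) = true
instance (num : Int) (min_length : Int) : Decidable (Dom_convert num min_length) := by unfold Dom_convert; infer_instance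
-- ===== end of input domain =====

-- B replaces A's LSB-first prepend-then-pad loop by a digit count plus MSB-first
-- positional extraction of each base-36 digit; alternative decomposition, same cost class.

-- ===== PORT A =====
def pvAlphabet : List Char :=
  ['0','1','2','3','4','5','6','7','8','9','A','B','C','D','E','F','G','H','I',
   'J','K','L','M','N','O','P','Q','R','S','T','U','V','W','X','Y','Z']

-- 'while num > 0: result = alphabet[num % 36] + result; num //= 36'
-- (index num % 36 is always in [0,36), so the pyGetD default is never used;
--  fuel = num.toNat is a totality guard only: num strictly decreases each turn)
def convertLoop (fuel : Nat) (num : Int) (result : List Char) : List Char :=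
  match fuel with
  | 0 => result
  | fuel + 1 =>
    if 0 < num then
      convertLoop fuel (PySem.Int.floordiv num 36)
        (PySem.List.pyGetD pvAlphabet (PySem.Int.mod num 36) ' ' :: result)
    else result

def convert (num : Int) (min_length : Int) : String :=
  let result := convertLoop num.toNat num []
  if (result.length : Int) < min_length then
    -- '0' * (min_length - len(result)) + result  (a negative repeat count is empty)
    String.mk (List.replicate (min_length - (result.length : Int)).toNat '0' ++ result)
  else String.mk result

-- ===== PORT B =====
-- 'n = m; while n > 0: n //= 36; digits += 1'  (fuel = n.toNat, a totality guard only)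
def countDigits (fuel : Nat) (n : Int) : Int :=
  match fuel with
  | 0 => 0
  | fuel + 1 =>
    if 0 < n then countDigits fuel (PySem.Int.floordiv n 36) + 1 else 0

def convert_alt (num : Int) (min_length : Int) : String :=
  let m := max num 0
  let digits := countDigits m.toNat m
  let length := max digits min_length
  -- '0' * (length - digits) + ''.join(alphabet[(m // 36 ** p) % 36]
  --                                   for p in range(digits - 1, -1, -1))
  -- (a negative repeat count is empty; p is nonnegative, so 36 ** p is 36 ^ p.toNat exactly)
  String.mk (List.replicate (length - digits).toNat '0' ++
    (PySem.List.pyRange (digits - 1) (-1) (-1)).map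
      (fun p => PySem.List.pyGetD pvAlphabet
        (PySem.Int.mod (PySem.Int.floordiv m (36 ^ p.toNat)) 36) ' '))

-- ===== PRECONDITION & SPEC =====
def Spec_convert (num : Int) (min_length : Int) (out : String) : Prop := out = convert_alt num min_length
instance (num : Int) (min_length : Int) (out : String) : Decidable (Spec_convert num min_length out) := by unfold Spec_convert; infer_instance

-- ===== CLAIM (what is proved, stated in full; the proofs are below) =====
def Claim_equal_convert : Prop := ∀ (num : Int) (min_length : Int), Dom_convert num min_length → Spec_convert num min_length (convert num min_length)

-- ===== LEMMAS AND PROOFS =====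

-- Nat-level digit functions used only by the proofs
def digitCh (k : Nat) : Char := pvAlphabet.getD k ' '

def dcNat (n : Nat) : Nat := if n = 0 then 0 else dcNat (n / 36) + 1
decreasing_by omega

def digitsNat (n : Nat) : List Char :=
  if n = 0 then [] else digitsNat (n / 36) ++ [digitCh (n % 36)]
decreasing_by omega

theorem convertLoop_aux : ∀ (fuel : Nat) (n : Int), n.toNat ≤ fuel →
    ∀ acc, convertLoop fuel n acc = digitsNat n.toNat ++ acc := by
  intro fuel
  induction fuel with
  | zero =>
    intro n hk acc
    have h0 : n.toNat = 0 := by omega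
    rw [convertLoop, h0, digitsNat]
    simp
  | succ fuel ih =>
    intro n hk acc
    rw [convertLoop]
    split_ifs with h
    · rw [PySem.Int.floordiv_eq_ediv_of_pos (by norm_num),
          PySem.Int.mod_eq_emod_of_pos (by norm_num)]
      rw [ih (n / 36) (by omega)]
      have h1 : (n / 36).toNat = n.toNat / 36 := by omega
      have h2 : n % 36 = ((n.toNat % 36 : Nat) : Int) := by omega
      rw [h2, PySem.List.pyGetD_natCast]
      rw [show digitsNat n.toNat = digitsNat (n.toNat / 36) ++ [digitCh (n.toNat % 36)] by
        rw [digitsNat]; simp [show ¬ n.toNat = 0 by omega]]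
      simp [digitCh, h1]
    · have h0 : n.toNat = 0 := by omega
      rw [h0]; rw [digitsNat]; simp

theorem countDigits_aux : ∀ (fuel : Nat) (n : Int), n.toNat ≤ fuel →
    countDigits fuel n = (dcNat n.toNat : Int) := by
  intro fuel
  induction fuel with
  | zero =>
    intro n hk
    have h0 : n.toNat = 0 := by omega
    rw [countDigits, h0, dcNat]
    simp
  | succ fuel ih =>
    intro n hk
    rw [countDigits]
    split_ifs with h
    · rw [PySem.Int.floordiv_eq_ediv_of_pos (by norm_num)]
      rw [ih (n / 36) (by omega)]
      rw [show dcNat n.toNat = dcNat (n.toNat / 36) + 1 by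
        rw [dcNat]; simp [show ¬ n.toNat = 0 by omega]]
      have h1 : (n / 36).toNat = n.toNat / 36 := by omega
      rw [h1]; push_cast; ring
    · have h0 : n.toNat = 0 := by omega
      rw [h0]; rw [dcNat]; simp

theorem length_digitsNat : ∀ n, (digitsNat n).length = dcNat n := by
  intro n
  induction n using Nat.strong_induction_on with
  | _ n ih =>
    rw [digitsNat, dcNat]
    split_ifs with h
    · simp
    · simp [ih (n / 36) (by omega)]

theorem lt_pow_dcNat : ∀ n, n < 36 ^ dcNat n := by
  intro n
  induction n using Nat.strong_induction_on with
  | _ n ih =>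
    rw [dcNat]
    split_ifs with h
    · omega
    · have := ih (n / 36) (by omega)
      rw [pow_succ]
      omega

theorem digitCh_zero : digitCh 0 = '0' := by decide

-- crux: the MSB-first positional read over positions k-1 … 0 is the padded digit string
theorem positional_eq : ∀ (k n : Nat), n < 36 ^ k →
    ((List.range k).reverse).map (fun p => digitCh ((n / 36 ^ p) % 36)) =
      List.replicate (k - dcNat n) '0' ++ digitsNat n := by
  intro k
  induction k with
  | zero =>
    intro n hn
    have : n = 0 := by simpa using hn
    subst this
    rw [digitsNat]; simp
  | succ k ih =>
    intro n hn
    have hdec : (List.range (k + 1)).reverse =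
        ((List.range k).reverse).map Nat.succ ++ [0] := by
      rw [List.range_succ_eq_map]
      simp
    rw [hdec, List.map_append, List.map_map]
    by_cases h0 : n = 0
    · subst h0
      have hmap : ∀ (l : List Nat), l.map ((fun p => digitCh ((0 / 36 ^ p) % 36)) ∘ Nat.succ)
          = List.replicate l.length '0' := by
        intro l
        induction l with
        | nil => rfl
        | cons a t iht =>
          simpa [Function.comp, Nat.zero_div, digitCh_zero, List.replicate_succ] using iht
      rw [hmap]
      rw [digitsNat, dcNat]
      simp [digitCh_zero, List.replicate_succ']
    · have hshift : ∀ p : Nat, ((fun p => digitCh ((n / 36 ^ p) % 36)) ∘ Nat.succ) p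
          = (fun p => digitCh ((n / 36 / 36 ^ p) % 36)) p := by
        intro p
        simp [Function.comp, pow_succ, Nat.div_div_eq_div_mul, Nat.mul_comm]
      rw [List.map_congr_left (fun p _ => hshift p)]
      have hlt : n / 36 < 36 ^ k := by
        rw [Nat.div_lt_iff_lt_mul (by norm_num)]
        calc n < 36 ^ (k + 1) := hn
          _ = 36 ^ k * 36 := by rw [pow_succ]
      rw [ih (n / 36) hlt]
      have hdc : dcNat n = dcNat (n / 36) + 1 := by
        rw [dcNat]; simp [h0]
      have hdig : digitsNat n = digitsNat (n / 36) ++ [digitCh (n % 36)] := by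
        rw [digitsNat]; simp [h0]
      rw [hdc, hdig]
      simp [List.append_assoc]

-- bridge: range(length-1, -1, -1) is the reversed List.range, cast to Int
theorem pyRange_down (c : Int) (hc : 0 ≤ c) :
    PySem.List.pyRange (c - 1) (-1) (-1) = ((List.range c.toNat).reverse).map (fun p : Nat => (p : Int)) := by
  simp only [PySem.List.pyRange, if_neg (by norm_num : ¬ ((-1:Int) = 0)),
    if_neg (by norm_num : ¬ ((0:Int) < -1))]
  by_cases hc0 : 0 < c
  · rw [if_pos (by omega : (-1:Int) < c - 1)]
    have hcnt : ((c - 1 - -1 + - -1 - 1) / - -1).toNat = c.toNat := by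
      norm_num
    rw [hcnt]
    apply List.ext_getElem
    · simp
    · intro i h1 h2
      simp only [List.getElem_map, List.getElem_reverse, List.getElem_range,
        List.length_range, List.length_map, List.length_reverse] at h1 h2 ⊢
      omega
  · have hc0' : c = 0 := by omega
    subst hc0'
    norm_num

theorem convert_eq_alt (num min_length : Int) :
    convert num min_length = convert_alt num min_length := by
  set t : Nat := num.toNat with ht
  have hm : max num 0 = (t : Int) := by omega
  -- B side
  have hcd : countDigits (max num 0).toNat (max num 0) = (dcNat t : Int) := by
    rw [hm]; rw [countDigits_aux (t:Int).toNat _ (le_refl _)]; simp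
  set L : Int := max (dcNat t : Int) min_length with hL
  have hBmap : ∀ p : Nat,
      PySem.List.pyGetD pvAlphabet
        (PySem.Int.mod (PySem.Int.floordiv (max num 0) (36 ^ ((p:Int)).toNat)) 36) ' '
      = digitCh ((t / 36 ^ p) % 36) := by
    intro p
    have hp : ((p:Int)).toNat = p := by omega
    rw [hp, hm]
    have hfd : PySem.Int.floordiv ((t:Int)) (36 ^ p) = ((t / 36 ^ p : Nat) : Int) := by
      rw [PySem.Int.floordiv_eq_ediv_of_pos (by positivity)]
      rw [show ((36:Int) ^ p) = ((36 ^ p : Nat) : Int) by push_cast; ring]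
      exact (Int.natCast_div t (36 ^ p)).symm
    rw [hfd]
    have hmod : PySem.Int.mod ((t / 36 ^ p : Nat) : Int) 36 = (((t / 36 ^ p) % 36 : Nat) : Int) := by
      rw [PySem.Int.mod_eq_emod_of_pos (by norm_num)]
      omega
    rw [hmod, PySem.List.pyGetD_natCast]
    rfl
  have hB : convert_alt num min_length =
      String.mk (List.replicate (L - (dcNat t : Int)).toNat '0' ++ digitsNat t) := by
    show String.mk
        (List.replicate (max (countDigits (max num 0).toNat (max num 0)) min_length
            - countDigits (max num 0).toNat (max num 0)).toNat '0' ++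
          (PySem.List.pyRange (countDigits (max num 0).toNat (max num 0) - 1) (-1) (-1)).map
            (fun p => PySem.List.pyGetD pvAlphabet
              (PySem.Int.mod (PySem.Int.floordiv (max num 0) (36 ^ p.toNat)) 36) ' ')) = _
    rw [hcd]
    congr 1
    congr 1
    rw [pyRange_down (dcNat t : Int) (by positivity), List.map_map]
    rw [show ((dcNat t : Int)).toNat = dcNat t by omega]
    have hpos := positional_eq (dcNat t) t (lt_pow_dcNat t)
    rw [Nat.sub_self] at hpos
    simp only [List.replicate_zero, List.nil_append] at hpos
    rw [← hpos]
    exact List.map_congr_left (fun p _ => hBmap p)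
  -- A side
  have hA0 : convertLoop num.toNat num [] = digitsNat t := by
    rw [convertLoop_aux num.toNat num (le_refl _) []]
    rw [← ht]
    simp
  rw [hB]
  show (if ((convertLoop num.toNat num []).length : Int) < min_length then
      String.mk (List.replicate (min_length - ((convertLoop num.toNat num []).length : Int)).toNat '0' ++ convertLoop num.toNat num [])
    else String.mk (convertLoop num.toNat num [])) = _
  rw [hA0, length_digitsNat t]
  split_ifs with h
  · have : (min_length - (dcNat t : Int)).toNat = (L - (dcNat t : Int)).toNat := by omega
    rw [this]
  · have : (L - (dcNat t : Int)).toNat = 0 := by omega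
    rw [this]
    simp

-- ===== VERDICT (by name: the statement is the Claim_ definition above) =====
theorem convert_spec : Claim_equal_convert := by
  intro num min_length _
  unfold Spec_convert
  exact convert_eq_alt num min_length
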